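-- pv_equiv track=rewrite | github.com/mogg3/tf-idf | main.py | calculate_df
-- ===== SOURCE A (Python) =====
-- def calculate_df(book, corpus):
--     df = {}
--     for word in book:
--         df[word] = 0
--         for corpus_document in corpus:
--             if word in corpus_document:
--                 df[word] += 1
--     return df
-- ===== SOURCE B (Python) =====
-- def calculate_df(book, corpus):
--     # One pass over the corpus building an inverted document-frequency table,
--     # then a single lookup pass over the book.
--     table = {}
--     for document in corpus:
--         for word in set(document):
--             table[word] = table.get(word, 0) + 1
--     return {word: table.get(word, 0) for word in book}
-- ===== Notes on version B (the rewrite author's own statement) =====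
-- stated objective: faster
-- what changed: B builds an inverted table (word -> number of documents containing it) in one pass over the corpus and then answers each book word by a dict lookup, instead of A's rescan of the whole corpus for every book word.
import Mathlib
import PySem

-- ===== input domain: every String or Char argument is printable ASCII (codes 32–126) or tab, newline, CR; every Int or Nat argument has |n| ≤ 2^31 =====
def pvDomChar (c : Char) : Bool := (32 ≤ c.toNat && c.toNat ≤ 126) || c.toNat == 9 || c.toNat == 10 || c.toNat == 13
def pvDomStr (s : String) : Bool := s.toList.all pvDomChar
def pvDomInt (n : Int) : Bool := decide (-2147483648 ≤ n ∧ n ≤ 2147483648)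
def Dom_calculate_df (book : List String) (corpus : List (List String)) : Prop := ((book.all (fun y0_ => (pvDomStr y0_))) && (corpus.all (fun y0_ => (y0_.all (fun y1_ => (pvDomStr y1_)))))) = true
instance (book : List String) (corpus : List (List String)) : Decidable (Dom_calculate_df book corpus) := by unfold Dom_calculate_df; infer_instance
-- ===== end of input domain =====

-- B replaces A's per-word rescan of the corpus by a one-pass inverted frequency table plus lookups (asymptotically faster).


-- ===== PORT A =====
def calculate_df (book : List String) (corpus : List (List String)) : List (String × Int) :=
  (book.foldl (fun df word =>
      corpus.foldl (fun df corpus_document =>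
          if corpus_document.contains word then df.modify word 0 (· + 1) else df)
        (df.insert word 0))
    PySem.Dict.empty).items

-- ===== PORT B =====
def calculate_df_alt (book : List String) (corpus : List (List String)) : List (String × Int) :=
  let table : PySem.Dict String Int :=
    corpus.foldl (fun table document =>
        (PySem.Set.ofList document).foldl (fun table word =>
            table.insert word (table.getD word 0 + 1))
          table)
      PySem.Dict.empty
  (book.foldl (fun df word => df.insert word (table.getD word 0)) PySem.Dict.empty).items

-- ===== PRECONDITION & SPEC =====
def Spec_calculate_df (book : List String) (corpus : List (List String)) (out : List (String × Int)) : Prop := out = calculate_df_alt book corpus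
instance (book : List String) (corpus : List (List String)) (out : List (String × Int)) : Decidable (Spec_calculate_df book corpus out) := by unfold Spec_calculate_df; infer_instance

-- ===== CLAIM (what is proved, stated in full; the proofs are below) =====
def Claim_equal_calculate_df : Prop := ∀ (book : List String) (corpus : List (List String)), Dom_calculate_df book corpus → Spec_calculate_df book corpus (calculate_df book corpus)

-- ===== LEMMAS AND PROOFS =====

-- A's inner corpus loop over an entry inserted at `word`: it just adds the document count to that entry.
lemma a_inner (word : String) (corpus : List (List String)) :
    ∀ (d : PySem.Dict String Int) (v : Int),
      corpus.foldl (fun df corpus_document =>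
          if corpus_document.contains word then df.modify word 0 (· + 1) else df)
        (d.insert word v)
      = d.insert word (v + (corpus.countP (fun doc => doc.contains word) : Int)) := by
  induction corpus with
  | nil => intro d v; simp [List.countP]
  | cons doc rest ih =>
      intro d v
      by_cases h : doc.contains word = true
      · have hm : (d.insert word v).modify word 0 (· + 1) = d.insert word (v + 1) := by
          have : (d.insert word v).modify word 0 (· + 1)
              = (d.insert word v).insert word ((d.insert word v).getD word 0 + 1) := rfl
          rw [this, PySem.Dict.getD_insert_self, PySem.Dict.insert_insert_self]
        rw [List.foldl_cons, if_pos h, hm, ih, List.countP_cons]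
        simp only [h, if_true]
        congr 1
        push_cast; ring
      · have h' : ¬ word ∈ doc := by simpa using h
        rw [List.foldl_cons, if_neg h, ih, List.countP_cons]
        simp [h']

-- B's table after the corpus pass: each word's entry is the number of documents containing it.
lemma b_table (w : String) (corpus : List (List String)) :
    ∀ (t : PySem.Dict String Int),
      (corpus.foldl (fun table document =>
          (PySem.Set.ofList document).foldl (fun table word =>
              table.insert word (table.getD word 0 + 1))
            table)
        t).getD w 0
      = t.getD w 0 + (corpus.countP (fun doc => doc.contains w) : Int) := by
  induction corpus with
  | nil => intro t; simp [List.countP]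
  | cons doc rest ih =>
      intro t
      simp only [List.foldl_cons, ih]
      rw [PySem.Dict.getD_foldl_insert_add_one]
      have hcnt : (PySem.Set.ofList doc).count w = if doc.contains w then 1 else 0 := by
        by_cases hw : w ∈ doc
        · rw [List.count_eq_one_of_mem (PySem.Set.nodup_ofList doc) (by simpa [PySem.Set.mem_ofList] using hw)]
          simp [hw]
        · rw [List.count_eq_zero_of_not_mem (by simpa [PySem.Set.mem_ofList] using hw)]
          simp [hw]
      rw [hcnt, List.countP_cons]
      by_cases h : doc.contains w = true
      · simp only [h, if_true]; push_cast; ring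
      · have h' : ¬ w ∈ doc := by simpa using h
        simp [h']

-- ===== VERDICT (by name: the statement is the Claim_ definition above) =====
theorem calculate_df_spec : Claim_equal_calculate_df := by
  intro book corpus _
  unfold Spec_calculate_df calculate_df calculate_df_alt
  congr 1
  have hf : ∀ (d : PySem.Dict String Int) (word : String),
      List.foldl (fun df corpus_document =>
          if corpus_document.contains word = true then df.modify word 0 (· + 1) else df)
        (d.insert word 0) corpus
      = d.insert word ((List.foldl (fun table document =>
            List.foldl (fun table word => table.insert word (table.getD word 0 + 1)) table
              (PySem.Set.ofList document)) PySem.Dict.empty corpus).getD word 0) := by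
    intro d word
    rw [a_inner, b_table, PySem.Dict.getD_empty, zero_add]
  exact congrArg (fun f => List.foldl f PySem.Dict.empty book) (funext fun d => funext fun w => hf d w)
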